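-- pv_equiv track=rewrite | github.com/yunisdev/num2azerbaijani | build/lib/num2azerbaijani/__init__.py | getLadder
-- ===== SOURCE A (Python) =====
-- def getLadder(num):
--     parts = divide_to_parts(str(num))
--     result = []
--     for part in parts:
--         numLadder = [i for i in part]
--         nums = []
--         for i in range(len(numLadder)):
--             if numLadder[i] != "0":
--                 nums.append(numLadder[i]+"0"*(len(numLadder)-1-i))
--         result.append(nums)
--     return result
--
-- def divide_to_parts(num):
--     parts = []
--     left = len(num) % 3
--     if len(num[:left]) > 0:
--         parts.append(num[:left])
--     j = 0
--     temp = ""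
--     for i in num[left:]:
--         temp += i
--         if j % 3 == 2:
--             parts.append(temp)
--             temp = ""
--         j += 1
--     return parts
-- ===== SOURCE B (Python) =====
-- def getLadder(num):
--     s = str(num)
--     buckets = [[] for _ in range((len(s) + 2) // 3)]
--     for i, c in enumerate(reversed(s)):
--         if c != "0":
--             buckets[i // 3].append(c + "0" * (i % 3))
--     return [b[::-1] for b in reversed(buckets)]
-- ===== Notes on version B (the rewrite author's own statement) =====
-- stated objective: alternative
-- what changed: Replaces A's two-phase split-into-left-aligned-parts-then-per-part-indexed-decompose with a single pass over the reversed digit string that routes each nonzero character, by its index's quotient and remainder modulo the group size, into a pre-allocated bucket with the right number of trailing zeros, then reverses each bucket and the bucket list.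
import Mathlib
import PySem

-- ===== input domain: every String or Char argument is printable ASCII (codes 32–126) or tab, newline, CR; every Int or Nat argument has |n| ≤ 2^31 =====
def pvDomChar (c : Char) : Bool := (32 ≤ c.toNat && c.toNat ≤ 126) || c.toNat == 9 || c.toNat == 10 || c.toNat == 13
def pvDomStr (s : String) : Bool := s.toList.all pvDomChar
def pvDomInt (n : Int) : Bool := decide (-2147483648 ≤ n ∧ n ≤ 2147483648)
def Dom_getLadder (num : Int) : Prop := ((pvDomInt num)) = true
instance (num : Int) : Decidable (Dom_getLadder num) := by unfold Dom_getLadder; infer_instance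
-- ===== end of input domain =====

-- B replaces A's split-into-parts-then-decompose two-phase construction by a single
-- reversed pass with modular index arithmetic filling pre-allocated buckets (objective:
-- alternative decomposition, same cost).

-- c + "0"*k  (shared string builder for digit-with-zeros entries)
def pvStr (c : Char) (k : Nat) : String := String.ofList (c :: List.replicate k '0')

-- ===== PORT A =====
-- the j/temp loop inside divide_to_parts
def pvLoopA (cs : List Char) (j : Nat) (temp : List Char) (parts : List (List Char)) :
    List (List Char) :=
  match cs with
  | [] => parts
  | c :: rest =>
    let temp' := temp ++ [c]
    if j % 3 = 2 then pvLoopA rest (j + 1) [] (parts ++ [temp'])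
    else pvLoopA rest (j + 1) temp' parts

def pvDivideToParts (cs : List Char) : List (List Char) :=
  let left := cs.length % 3
  let parts := if (cs.take left).length > 0 then [cs.take left] else []
  pvLoopA (cs.drop left) 0 [] parts

-- the indexed inner loop building nums for one part (flen = len(numLadder))
def pvInnerA (flen : Nat) (i : Nat) (cs : List Char) (nums : List String) : List String :=
  match cs with
  | [] => nums
  | c :: rest =>
    pvInnerA flen (i + 1) rest (if c ≠ '0' then nums ++ [pvStr c (flen - 1 - i)] else nums)

def getLadder (num : Int) : List (List String) :=
  (pvDivideToParts (PySem.Int.toChars num)).map (fun part => pvInnerA part.length 0 part [])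

-- ===== PORT B =====
-- single pass over the reversed digit string, filling bucket i//3 with c + "0"*(i%3)
def pvLoopB (cs : List Char) (i : Nat) (bs : List (List String)) : List (List String) :=
  match cs with
  | [] => bs
  | c :: rest =>
    pvLoopB rest (i + 1)
      (if c ≠ '0' then bs.modify (i / 3) (fun b => b ++ [pvStr c (i % 3)]) else bs)

def getLadder_alt (num : Int) : List (List String) :=
  let s := PySem.Int.toChars num
  let buckets := List.replicate ((s.length + 2) / 3) ([] : List String)
  ((pvLoopB s.reverse 0 buckets).map List.reverse).reverse

-- ===== PRECONDITION & SPEC =====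
def Spec_getLadder (num : Int) (out : List (List String)) : Prop := out = getLadder_alt num
instance (num : Int) (out : List (List String)) : Decidable (Spec_getLadder num out) := by unfold Spec_getLadder; infer_instance

-- ===== CLAIM (what is proved, stated in full; the proofs are below) =====
def Claim_equal_getLadder : Prop := ∀ (num : Int), Dom_getLadder num → Spec_getLadder num (getLadder num)

-- ===== LEMMAS AND PROOFS =====

-- A's output and B's output as functions of the digit-character list
def pvAOut (cs : List Char) : List (List String) :=
  (pvDivideToParts cs).map (fun part => pvInnerA part.length 0 part [])

def pvBOut (cs : List Char) : List (List String) :=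
  ((pvLoopB cs.reverse 0 (List.replicate ((cs.length + 2) / 3) ([] : List String))).map
      List.reverse).reverse

-- A's parts loop chops a list of length 3k into consecutive triples
def pvChunk3 (cs : List Char) : List (List Char) :=
  match cs with
  | a :: b :: c :: rest => [a, b, c] :: pvChunk3 rest
  | _ => []

lemma pvLoopA_chunk : ∀ (k : Nat) (cs : List Char) (j : Nat) (parts : List (List Char)),
    cs.length = 3 * k → j % 3 = 0 → pvLoopA cs j [] parts = parts ++ pvChunk3 cs := by
  intro k
  induction k with
  | zero =>
    intro cs j parts hlen _
    have : cs = [] := List.length_eq_zero_iff.mp (by omega)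
    subst this; simp [pvLoopA, pvChunk3]
  | succ k ih =>
    intro cs j parts hlen hj
    match cs with
    | a :: b :: c :: rest =>
      have h1 : ¬ j % 3 = 2 := by omega
      have h2 : ¬ (j + 1) % 3 = 2 := by omega
      have h3 : (j + 2) % 3 = 2 := by omega
      have h4 : (j + 3) % 3 = 0 := by omega
      simp only [pvLoopA, if_neg h1, if_neg h2, if_pos h3, List.nil_append]
      show pvLoopA rest (j + 3) [] (parts ++ [[a, b, c]]) = parts ++ pvChunk3 (a :: b :: c :: rest)
      rw [ih rest (j + 3) (parts ++ [[a, b, c]]) (by simp at hlen; omega) h4]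
      simp [pvChunk3]

lemma pvChunk3_append (a b c : Char) : ∀ (k : Nat) (xs : List Char), xs.length = 3 * k →
    pvChunk3 (xs ++ [a, b, c]) = pvChunk3 xs ++ [[a, b, c]] := by
  intro k
  induction k with
  | zero =>
    intro xs hlen
    have : xs = [] := List.length_eq_zero_iff.mp (by omega)
    subst this; simp [pvChunk3]
  | succ k ih =>
    intro xs hlen
    match xs with
    | x :: y :: z :: rest =>
      simp only [List.cons_append, pvChunk3]
      rw [ih rest (by simp at hlen; omega)]

-- closed form of divide_to_parts
lemma pvDivideToParts_eq (cs : List Char) :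
    pvDivideToParts cs =
      (if cs.length % 3 > 0 then [cs.take (cs.length % 3)] else []) ++
        pvChunk3 (cs.drop (cs.length % 3)) := by
  unfold pvDivideToParts
  have hle : cs.length % 3 ≤ cs.length := Nat.mod_le _ _
  have hlen : (cs.drop (cs.length % 3)).length = 3 * (cs.length / 3) := by
    simp [List.length_drop]; omega
  rw [pvLoopA_chunk (cs.length / 3) _ 0 _ hlen rfl]
  have ht : (cs.take (cs.length % 3)).length = cs.length % 3 := by
    simp [List.length_take]; omega
  rw [ht]

-- B's loop shifted three indices up leaves the head bucket untouched
lemma pvLoopB_shift : ∀ (cs : List Char) (i : Nat) (b0 : List String) (bs : List (List String)),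
    pvLoopB cs (i + 3) (b0 :: bs) = b0 :: pvLoopB cs i bs := by
  intro cs
  induction cs with
  | nil => intro i b0 bs; simp [pvLoopB]
  | cons c rest ih =>
    intro i b0 bs
    have hd : (i + 3) / 3 = i / 3 + 1 := by omega
    have hm : (i + 3) % 3 = i % 3 := by omega
    simp only [pvLoopB, hd, hm]
    by_cases h : c ≠ '0'
    · simp only [if_pos h, List.modify_succ_cons]
      exact ih (i + 1) b0 _
    · simp only [if_neg h]
      exact ih (i + 1) b0 bs

-- appending a full triple at the end appends one decomposed group, A side
lemma pvAOut_append (front : List Char) (a b c : Char) :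
    pvAOut (front ++ [a, b, c]) = pvAOut front ++ [pvInnerA 3 0 [a, b, c] []] := by
  unfold pvAOut
  rw [pvDivideToParts_eq, pvDivideToParts_eq]
  have hmod : (front ++ [a, b, c]).length % 3 = front.length % 3 := by
    simp only [List.length_append, List.length_cons, List.length_nil]; omega
  have hle : front.length % 3 ≤ front.length := Nat.mod_le _ _
  rw [hmod, List.take_append_of_le_length hle, List.drop_append_of_le_length hle]
  have hdlen : (front.drop (front.length % 3)).length = 3 * (front.length / 3) := by
    simp [List.length_drop]; omega
  rw [pvChunk3_append a b c (front.length / 3) _ hdlen]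
  simp

-- three steps of B's loop at index 0 fill exactly the head bucket
lemma pvLoopB_triple (c b a : Char) (rs : List Char) (bs : List (List String)) :
    pvLoopB (c :: b :: a :: rs) 0 ([] :: bs) =
      (((if c ≠ '0' then [pvStr c 0] else []) ++ (if b ≠ '0' then [pvStr b 1] else [])) ++
        (if a ≠ '0' then [pvStr a 2] else [])) :: pvLoopB rs 0 bs := by
  simp only [pvLoopB, show (0:Nat)/3 = 0 from rfl, show (0:Nat)%3 = 0 from rfl,
    show ((0:Nat)+1)%3 = 1 from rfl, show ((0:Nat)+1+1)%3 = 2 from rfl]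
  split_ifs <;>
    ((try simp only [List.modify_zero_cons]);
     rw [show (0:Nat)+1+1+1 = 0 + 3 from rfl, pvLoopB_shift]; try simp)

-- the same on B's side
lemma pvBOut_append (front : List Char) (a b c : Char) :
    pvBOut (front ++ [a, b, c]) = pvBOut front ++ [pvInnerA 3 0 [a, b, c] []] := by
  unfold pvBOut
  have hrev : (front ++ [a, b, c]).reverse = c :: b :: a :: front.reverse := by
    simp
  have hcnt : ((front ++ [a, b, c]).length + 2) / 3 = (front.length + 2) / 3 + 1 := by
    simp only [List.length_append, List.length_cons, List.length_nil]; omega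
  rw [hrev, hcnt, List.replicate_succ, pvLoopB_triple]
  simp only [List.map_cons, List.reverse_cons]
  congr 1
  show _ = [pvInnerA 3 0 [a, b, c] []]
  simp only [pvInnerA]
  norm_num
  split_ifs <;> simp [pvStr]

lemma pvKey (cs : List Char) : pvAOut cs = pvBOut cs := by
  induction hn : cs.length using Nat.strong_induction_on generalizing cs with
  | _ n ih =>
    match n, hn with
    | 0, hn =>
      have : cs = [] := List.length_eq_zero_iff.mp hn
      subst this; rfl
    | 1, hn =>
      obtain ⟨a, rfl⟩ := List.length_eq_one_iff.mp hn
      show pvAOut [a] = pvBOut [a]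
      simp only [pvAOut, pvBOut, pvDivideToParts_eq]
      norm_num [pvChunk3, pvInnerA, pvLoopB]
      split_ifs <;> simp [pvStr]
    | 2, hn =>
      obtain ⟨a, b, rfl⟩ := List.length_eq_two.mp hn
      show pvAOut [a, b] = pvBOut [a, b]
      simp only [pvAOut, pvBOut, pvDivideToParts_eq]
      norm_num [pvChunk3, pvInnerA, pvLoopB]
      split_ifs <;> simp [pvStr]
    | (m + 3), hn =>
      have hsplit : cs = cs.take m ++ cs.drop m := (List.take_append_drop m cs).symm
      have hdl : (cs.drop m).length = 3 := by simp [List.length_drop]; omega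
      obtain ⟨a, b, c, hd⟩ := List.length_eq_three.mp hdl
      have htl : (cs.take m).length = m := by simp [List.length_take]; omega
      rw [hsplit, hd]
      rw [pvAOut_append, pvBOut_append, ih m (by omega) (cs.take m) htl]

-- ===== VERDICT (by name: the statement is the Claim_ definition above) =====
theorem getLadder_spec : Claim_equal_getLadder := by
  intro num _
  show getLadder num = getLadder_alt num
  exact pvKey (PySem.Int.toChars num)
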